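-- pv_equiv track=rewrite | github.com/fernandodm/sistemasoperativos | OS/codes/badwaysetting.py | getBadWayWithSize
-- ===== SOURCE A (Python) =====
-- def getBadWayWithSize(cells,size):
-- 	adressActual = 0
-- 	adressMayor = 0
--
-- 	contActual = 0
-- 	contMayor = 0
--
-- 	for key in cells.keys():
--
-- 		if(cells[key] == None):
--
-- 			contActual += 1
-- 			if((contActual>=contMayor) and (contActual>=size)):
-- 				contMayor = contActual
-- 				adressMayor = adressActual
-- 		else:
-- 			contActual = 0
-- 		adressActual += 1
-- 	if(adressMayor != 0):
-- 		return adressMayor-contMayor+1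
--
-- 	return None
-- ===== SOURCE B (Python) =====
-- def getBadWayWithSize(cells, size):
--     # Collect the maximal runs of free cells as (start, length) pairs.
--     runs = []
--     start = None
--     i = 0
--     for v in cells.values():
--         if v == None:
--             if start is None:
--                 start = i
--         elif start is not None:
--             runs.append((start, i - start))
--             start = None
--         i += 1
--     if start is not None:
--         runs.append((start, i - start))
--     # Pick the last run of maximal length among those long enough.
--     best = None
--     for s, length in runs:
--         if length >= size and (best is None or length >= best[1]):
--             best = (s, length)
--     return best[0] if best is not None else None
-- ===== Notes on version B (the rewrite author's own statement) =====
-- stated objective: idiomatic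
-- what changed: B decomposes the single max-tracking scan into two phases: it first collects the maximal free-cell runs as (start, length) pairs, then selects the last longest qualifying run and returns its start directly, instead of A's four-counter pass that reconstructs the start as end-length+1 behind an address!=0 sentinel.
-- intended difference: When the only free cell is the very first one and size <= 1, A's best run ends at address 0, so its 'adressMayor != 0' found-flag fails and A returns None; B returns the intended start address 0 of that valid free run. — e.g. on getBadWayWithSize([(0, none)], 1): A returns none, B returns some 0
import Mathlib
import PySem

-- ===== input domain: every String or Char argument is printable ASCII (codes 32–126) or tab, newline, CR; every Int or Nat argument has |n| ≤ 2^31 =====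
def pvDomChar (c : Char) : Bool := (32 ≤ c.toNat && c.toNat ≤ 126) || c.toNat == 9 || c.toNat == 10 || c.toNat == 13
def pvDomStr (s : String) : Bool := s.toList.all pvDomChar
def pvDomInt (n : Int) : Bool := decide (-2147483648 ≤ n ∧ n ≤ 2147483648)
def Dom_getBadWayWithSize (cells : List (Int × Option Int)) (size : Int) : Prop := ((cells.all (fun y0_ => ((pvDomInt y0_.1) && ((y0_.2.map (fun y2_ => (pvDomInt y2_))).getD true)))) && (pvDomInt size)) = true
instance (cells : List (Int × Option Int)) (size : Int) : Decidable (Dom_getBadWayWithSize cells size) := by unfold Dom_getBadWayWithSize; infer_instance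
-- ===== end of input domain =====

-- B replaces A's four-counter sentinel scan with a two-phase pass (collect the free runs, then
-- pick the last longest qualifying one); same O(n) cost, and B returns the intended address 0
-- where A's 'adressMayor != 0' found-flag wrongly yields None (see D_ below).

-- ===== PORT A =====
-- state = (adressActual, adressMayor, contActual, contMayor)
def stepA (size : Int) (st : Int × Int × Int × Int) (kv : Int × Option Int) : Int × Int × Int × Int :=
  if kv.2 = none then
    let contActual := st.2.2.1 + 1
    if contActual ≥ st.2.2.2 ∧ contActual ≥ size then
      (st.1 + 1, st.1, contActual, contActual)
    else
      (st.1 + 1, st.2.1, contActual, st.2.2.2)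
  else
    (st.1 + 1, st.2.1, 0, st.2.2.2)

def getBadWayWithSize (cells : List (Int × Option Int)) (size : Int) : Option Int :=
  let s := cells.foldl (stepA size) (0, 0, 0, 0)
  if s.2.1 ≠ 0 then some (s.2.1 - s.2.2.2 + 1) else none

-- ===== PORT B =====
-- group state = (runs, start, i): maximal free runs closed so far, open-run start, index
def stepG (st : List (Int × Int) × Option Int × Int) (kv : Int × Option Int) : List (Int × Int) × Option Int × Int :=
  if kv.2 = none then
    match st.2.1 with
    | none => (st.1, some st.2.2, st.2.2 + 1)
    | some s => (st.1, some s, st.2.2 + 1)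
  else
    match st.2.1 with
    | none => (st.1, none, st.2.2 + 1)
    | some s => (st.1 ++ [(s, st.2.2 - s)], none, st.2.2 + 1)

def closeRuns (st : List (Int × Int) × Option Int × Int) : List (Int × Int) :=
  match st.2.1 with
  | none => st.1
  | some s => st.1 ++ [(s, st.2.2 - s)]

-- selection step: best = (start, length); a later run of maximal qualifying length wins
def stepS (size : Int) (b : Option (Int × Int)) (r : Int × Int) : Option (Int × Int) :=
  match b with
  | none => if r.2 ≥ size then some r else none
  | some p => if r.2 ≥ size ∧ r.2 ≥ p.2 then some r else some p

def getBadWayWithSize_alt (cells : List (Int × Option Int)) (size : Int) : Option Int :=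
  let runs := closeRuns (cells.foldl stepG ([], none, 0))
  let best := runs.foldl (stepS size) none
  match best with
  | some b => some b.1
  | none => none

-- ===== PRECONDITION & SPEC =====
-- When the only free cell is the very first one and size <= 1, A's best run ends at address 0,
-- so its 'adressMayor != 0' found-flag fails and A returns none; B returns the intended start
-- address (some 0) of that valid free run.
def D_getBadWayWithSize (cells : List (Int × Option Int)) (size : Int) : Prop :=
  cells ≠ [] ∧ (cells.headI).2 = none ∧ (∀ kv ∈ cells.tail, kv.2 ≠ none) ∧ size ≤ 1
instance (cells : List (Int × Option Int)) (size : Int) : Decidable (D_getBadWayWithSize cells size) := by unfold D_getBadWayWithSize; infer_instance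

def Spec_getBadWayWithSize (cells : List (Int × Option Int)) (size : Int) (out : Option Int) : Prop := ¬ D_getBadWayWithSize cells size → out = getBadWayWithSize_alt cells size
instance (cells : List (Int × Option Int)) (size : Int) (out : Option Int) : Decidable (Spec_getBadWayWithSize cells size out) := by unfold Spec_getBadWayWithSize; infer_instance

def pvDiffWitness_getBadWayWithSize : (List (Int × Option Int)) × Int := ([(0, none)], 1)
def pvDiffWitnessOut_getBadWayWithSize : (Option Int) × (Option Int) := (none, some 0)

-- ===== CLAIM (what is proved, stated in full; the proofs are below) =====
def Claim_unchanged_getBadWayWithSize : Prop := ∀ (cells : List (Int × Option Int)) (size : Int), Dom_getBadWayWithSize cells size → Spec_getBadWayWithSize cells size (getBadWayWithSize cells size)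
def Claim_changed_getBadWayWithSize : Prop := Dom_getBadWayWithSize (pvDiffWitness_getBadWayWithSize.1) (pvDiffWitness_getBadWayWithSize.2) ∧ D_getBadWayWithSize (pvDiffWitness_getBadWayWithSize.1) (pvDiffWitness_getBadWayWithSize.2) ∧ getBadWayWithSize (pvDiffWitness_getBadWayWithSize.1) (pvDiffWitness_getBadWayWithSize.2) = pvDiffWitnessOut_getBadWayWithSize.1 ∧ getBadWayWithSize_alt (pvDiffWitness_getBadWayWithSize.1) (pvDiffWitness_getBadWayWithSize.2) = pvDiffWitnessOut_getBadWayWithSize.2 ∧ pvDiffWitnessOut_getBadWayWithSize.1 ≠ pvDiffWitnessOut_getBadWayWithSize.2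
def Claim_exact_getBadWayWithSize : Prop := ∀ (cells : List (Int × Option Int)) (size : Int), Dom_getBadWayWithSize cells size → D_getBadWayWithSize cells size → getBadWayWithSize cells size ≠ getBadWayWithSize_alt cells size

-- ===== LEMMAS AND PROOFS =====

def encodeB (b : Option (Int × Int)) : Int × Int :=
  match b with
  | none => (0, 0)
  | some r => (r.1 + r.2 - 1, r.2)

def bestOf (size : Int) (rs : List (Int × Int)) : Option (Int × Int) :=
  rs.foldl (stepS size) none

-- the combined loop invariant relating A's state to B's group state after a prefix p
def InvAB (size : Int) (p : List (Int × Option Int)) : Prop :=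
  let a := p.foldl (stepA size) (0, 0, 0, 0)
  let g := p.foldl stepG ([], none, 0)
  a.1 = g.2.2 ∧ g.2.2 = (p.length : Int) ∧
  (∀ s, g.2.1 = some s → 0 ≤ s ∧ a.2.2.1 = g.2.2 - s ∧ 1 ≤ a.2.2.1) ∧
  (g.2.1 = none → a.2.2.1 = 0) ∧
  (a.2.1, a.2.2.2) = encodeB (bestOf size (closeRuns g)) ∧
  (∀ r, bestOf size (closeRuns g) = some r → 0 ≤ r.1 ∧ 1 ≤ r.2 ∧ size ≤ r.2) ∧
  (bestOf size (closeRuns g) = some (0, 1) →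
    p ≠ [] ∧ (p.headI).2 = none ∧ ∀ kv ∈ p.tail, kv.2 ≠ none)

theorem bestOf_append (size : Int) (rs : List (Int × Int)) (r : Int × Int) :
    bestOf size (rs ++ [r]) = stepS size (bestOf size rs) r := by
  simp [bestOf, List.foldl_append]

theorem stepA_free (size aA aM cA cM : Int) (x : Int × Option Int) (hx : x.2 = none) :
    stepA size (aA, aM, cA, cM) x =
      if cA + 1 ≥ cM ∧ cA + 1 ≥ size then (aA + 1, aA, cA + 1, cA + 1)
      else (aA + 1, aM, cA + 1, cM) := by
  unfold stepA; rw [if_pos hx]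

theorem stepA_occ (size aA aM cA cM : Int) (x : Int × Option Int) (hx : x.2 ≠ none) :
    stepA size (aA, aM, cA, cM) x = (aA + 1, aM, 0, cM) := by
  unfold stepA; rw [if_neg hx]

theorem stepG_free_none (rs : List (Int × Int)) (i : Int) (x : Int × Option Int)
    (hx : x.2 = none) : stepG (rs, none, i) x = (rs, some i, i + 1) := by
  unfold stepG; rw [if_pos hx]

theorem stepG_free_some (rs : List (Int × Int)) (s i : Int) (x : Int × Option Int)
    (hx : x.2 = none) : stepG (rs, some s, i) x = (rs, some s, i + 1) := by
  unfold stepG; rw [if_pos hx]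

theorem stepG_occ_none (rs : List (Int × Int)) (i : Int) (x : Int × Option Int)
    (hx : x.2 ≠ none) : stepG (rs, none, i) x = (rs, none, i + 1) := by
  unfold stepG; rw [if_neg hx]

theorem stepG_occ_some (rs : List (Int × Int)) (s i : Int) (x : Int × Option Int)
    (hx : x.2 ≠ none) : stepG (rs, some s, i) x = (rs ++ [(s, i - s)], none, i + 1) := by
  unfold stepG; rw [if_neg hx]

theorem stepS_none (size : Int) (r : Int × Int) :
    stepS size none r = if r.2 ≥ size then some r else none := rfl

theorem stepS_some (size : Int) (p r : Int × Int) :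
    stepS size (some p) r = if r.2 ≥ size ∧ r.2 ≥ p.2 then some r else some p := rfl

theorem inv_holds (size : Int) (p : List (Int × Option Int)) : InvAB size p := by
  induction p using List.reverseRecOn with
  | nil => simp [InvAB, closeRuns, bestOf, encodeB]
  | append_singleton p x ih =>
    rw [InvAB] at ih ⊢
    simp only [List.foldl_append, List.foldl_cons, List.foldl_nil]
    rcases hA : p.foldl (stepA size) (0, 0, 0, 0) with ⟨aA, aM, cA, cM⟩
    rcases hG : p.foldl stepG ([], none, 0) with ⟨rs, os, i⟩
    rw [hA, hG] at ih
    obtain ⟨h1, h2, h3, h4, h5, h6, h7⟩ := ih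
    simp only at h1 h2 h3 h4 h5 h6 h7
    by_cases hx : x.2 = none
    · cases os with
      | none =>
        -- a fresh run of length 1 opens at index i
        have hc0 : cA = 0 := h4 rfl
        subst hc0
        have hbnew : bestOf size (closeRuns (rs, some i, i + 1)) = stepS size (bestOf size rs) (i, 1) := by
          simp only [closeRuns]
          rw [show i + 1 - i = 1 by ring, bestOf_append]
        have hold : (aM, cM) = encodeB (bestOf size rs) := by simpa [closeRuns] using h5
        rw [stepA_free size aA aM 0 cM x hx, stepG_free_none rs i x hx]
        rcases hb : bestOf size rs with _ | ⟨s0, L0⟩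
        all_goals rw [hb] at hold hbnew
        · simp only [encodeB, Prod.mk.injEq] at hold
          obtain ⟨haM, hcM⟩ := hold
          by_cases hcond : (0 : Int) + 1 ≥ cM ∧ (0 : Int) + 1 ≥ size
          · rw [if_pos hcond, hbnew, stepS_none, if_pos (show ((i, (1:Int)) : Int × Int).2 ≥ size by omega)]
            simp only []
            refine ⟨by omega, by simp; omega, ?_, ?_, ?_, ?_, ?_⟩
            · intro s' hs'; injection hs' with hs'; subst hs'; omega
            · intro h; simp at h
            · simp [encodeB, Prod.ext_iff]; omega
            · intro r hr; injection hr with hr; subst hr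
              refine ⟨by omega, by omega, by omega⟩
            · intro hbest
              have hi0 : i = 0 := by simpa using hbest
              have hpnil : p = [] := by
                have := h2; rw [hi0] at this
                exact List.length_eq_zero_iff.mp (by exact_mod_cast this.symm)
              subst hpnil
              simp [hx]
          · rw [if_neg hcond, hbnew, stepS_none, if_neg (show ¬ ((i, (1:Int)) : Int × Int).2 ≥ size by simp; omega)]
            simp only []
            refine ⟨by omega, by simp; omega, ?_, ?_, ?_, ?_, ?_⟩
            · intro s' hs'; injection hs' with hs'; subst hs'; omega
            · intro h; simp at h
            · simp [encodeB, Prod.ext_iff]; omega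
            · intro r hr; simp at hr
            · intro hbest; simp at hbest
        · simp only [encodeB, Prod.mk.injEq] at hold
          obtain ⟨haM, hcM⟩ := hold
          have hgood : 0 ≤ s0 ∧ 1 ≤ L0 ∧ size ≤ L0 := by
            have := h6 (s0, L0); simp only [closeRuns] at this; exact this (by rw [hb])
          by_cases hcond : (0 : Int) + 1 ≥ cM ∧ (0 : Int) + 1 ≥ size
          · rw [if_pos hcond, hbnew, stepS_some,
              if_pos (show ((i, (1:Int)) : Int × Int).2 ≥ size ∧ ((i, (1:Int)) : Int × Int).2 ≥ ((s0, L0) : Int × Int).2 by constructor <;> simp <;> omega)]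
            simp only []
            refine ⟨by omega, by simp; omega, ?_, ?_, ?_, ?_, ?_⟩
            · intro s' hs'; injection hs' with hs'; subst hs'; omega
            · intro h; simp at h
            · simp [encodeB, Prod.ext_iff]; omega
            · intro r hr; injection hr with hr; subst hr
              refine ⟨by omega, by omega, by omega⟩
            · intro hbest
              have hi0 : i = 0 := by simpa using hbest
              have hpnil : p = [] := by
                have := h2; rw [hi0] at this
                exact List.length_eq_zero_iff.mp (by exact_mod_cast this.symm)
              subst hpnil
              simp [hx]
          · rw [if_neg hcond, hbnew, stepS_some,
              if_neg (show ¬ (((i, (1:Int)) : Int × Int).2 ≥ size ∧ ((i, (1:Int)) : Int × Int).2 ≥ ((s0, L0) : Int × Int).2) by simp; omega)]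
            simp only []
            refine ⟨by omega, by simp; omega, ?_, ?_, ?_, ?_, ?_⟩
            · intro s' hs'; injection hs' with hs'; subst hs'; omega
            · intro h; simp at h
            · simp [encodeB, Prod.ext_iff]; omega
            · intro r hr; injection hr with hr; subst hr; omega
            · intro hbest
              injection hbest with hbest
              rw [Prod.mk.injEq] at hbest
              omega
      | some s =>
        -- the open run extends from length cA to cA + 1
        obtain ⟨hs0, hcA, hcA1⟩ := h3 s rfl
        have hbold : bestOf size (closeRuns (rs, some s, i)) = stepS size (bestOf size rs) (s, cA) := by
          simp only [closeRuns]
          rw [show i - s = cA by omega, bestOf_append]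
        have hbnew : bestOf size (closeRuns (rs, some s, i + 1)) = stepS size (bestOf size rs) (s, cA + 1) := by
          simp only [closeRuns]
          rw [show i + 1 - s = cA + 1 by omega, bestOf_append]
        have hold : (aM, cM) = encodeB (stepS size (bestOf size rs) (s, cA)) := by
          rw [h5, hbold]
        rw [stepA_free size aA aM cA cM x hx, stepG_free_some rs s i x hx]
        rcases hb : bestOf size rs with _ | ⟨s0, L0⟩
        all_goals rw [hb] at hold hbnew
        · rw [stepS_none] at hold
          by_cases hq : ((s, cA) : Int × Int).2 ≥ size
          · rw [if_pos hq, encodeB] at hold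
            simp only [Prod.mk.injEq] at hold
            obtain ⟨haM, hcM⟩ := hold
            simp only at hq
            have hcond : cA + 1 ≥ cM ∧ cA + 1 ≥ size := by omega
            rw [if_pos hcond, hbnew, stepS_none, if_pos (show ((s, cA + 1) : Int × Int).2 ≥ size by simp; omega)]
            simp only []
            refine ⟨by omega, by simp; omega, ?_, ?_, ?_, ?_, ?_⟩
            · intro s' hs'; injection hs' with hs'; subst hs'; omega
            · intro h; simp at h
            · simp [encodeB, Prod.ext_iff]; omega
            · intro r hr; injection hr with hr; subst hr
              refine ⟨by omega, by omega, by omega⟩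
            · intro hbest
              injection hbest with hbest
              rw [Prod.mk.injEq] at hbest
              omega
          · rw [if_neg hq, encodeB] at hold
            simp only [Prod.mk.injEq] at hold
            obtain ⟨haM, hcM⟩ := hold
            simp only at hq
            by_cases hq1 : ((s, cA + 1) : Int × Int).2 ≥ size
            · simp only at hq1
              have hcond : cA + 1 ≥ cM ∧ cA + 1 ≥ size := by omega
              rw [if_pos hcond, hbnew, stepS_none, if_pos (show ((s, cA + 1) : Int × Int).2 ≥ size by simp; omega)]
              simp only []
              refine ⟨by omega, by simp; omega, ?_, ?_, ?_, ?_, ?_⟩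
              · intro s' hs'; injection hs' with hs'; subst hs'; omega
              · intro h; simp at h
              · simp [encodeB, Prod.ext_iff]; omega
              · intro r hr; injection hr with hr; subst hr
                refine ⟨by omega, by omega, by omega⟩
              · intro hbest
                injection hbest with hbest
                rw [Prod.mk.injEq] at hbest
                omega
            · simp only at hq1
              have hcond : ¬ (cA + 1 ≥ cM ∧ cA + 1 ≥ size) := by omega
              rw [if_neg hcond, hbnew, stepS_none, if_neg (show ¬ ((s, cA + 1) : Int × Int).2 ≥ size by simp; omega)]
              simp only []
              refine ⟨by omega, by simp; omega, ?_, ?_, ?_, ?_, ?_⟩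
              · intro s' hs'; injection hs' with hs'; subst hs'; omega
              · intro h; simp at h
              · simp [encodeB, Prod.ext_iff]; omega
              · intro r hr; simp at hr
              · intro hbest; simp at hbest
        · rw [stepS_some] at hold
          by_cases hq : ((s, cA) : Int × Int).2 ≥ size ∧ ((s, cA) : Int × Int).2 ≥ ((s0, L0) : Int × Int).2
          · rw [if_pos hq, encodeB] at hold
            simp only [Prod.mk.injEq] at hold
            obtain ⟨haM, hcM⟩ := hold
            simp only at hq
            have hcond : cA + 1 ≥ cM ∧ cA + 1 ≥ size := by omega
            rw [if_pos hcond, hbnew, stepS_some,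
              if_pos (show ((s, cA + 1) : Int × Int).2 ≥ size ∧ ((s, cA + 1) : Int × Int).2 ≥ ((s0, L0) : Int × Int).2 by constructor <;> simp <;> omega)]
            simp only []
            refine ⟨by omega, by simp; omega, ?_, ?_, ?_, ?_, ?_⟩
            · intro s' hs'; injection hs' with hs'; subst hs'; omega
            · intro h; simp at h
            · simp [encodeB, Prod.ext_iff]; omega
            · intro r hr; injection hr with hr; subst hr
              refine ⟨by omega, by omega, by omega⟩
            · intro hbest
              injection hbest with hbest
              rw [Prod.mk.injEq] at hbest
              omega
          · rw [if_neg hq, encodeB] at hold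
            simp only [Prod.mk.injEq] at hold
            obtain ⟨haM, hcM⟩ := hold
            have hq' : ¬ (cA ≥ size ∧ cA ≥ L0) := by
              intro h; exact hq (by constructor <;> simp <;> omega)
            have hgood : 0 ≤ s0 ∧ 1 ≤ L0 ∧ size ≤ L0 := by
              have := h6 (s0, L0)
              rw [hbold, hb, stepS_some, if_neg hq] at this
              exact this rfl
            by_cases hq1 : ((s, cA + 1) : Int × Int).2 ≥ size ∧ ((s, cA + 1) : Int × Int).2 ≥ ((s0, L0) : Int × Int).2
            · have hq1' : cA + 1 ≥ size ∧ cA + 1 ≥ L0 := by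
                obtain ⟨u, v⟩ := hq1; simp only at u v; exact ⟨u, v⟩
              have hcond : cA + 1 ≥ cM ∧ cA + 1 ≥ size := by omega
              rw [if_pos hcond, hbnew, stepS_some, if_pos hq1]
              simp only []
              refine ⟨by omega, by simp; omega, ?_, ?_, ?_, ?_, ?_⟩
              · intro s' hs'; injection hs' with hs'; subst hs'; omega
              · intro h; simp at h
              · simp [encodeB, Prod.ext_iff]; omega
              · intro r hr; injection hr with hr; subst hr
                refine ⟨by omega, by omega, by omega⟩
              · intro hbest
                injection hbest with hbest
                rw [Prod.mk.injEq] at hbest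
                omega
            · have hq1' : ¬ (cA + 1 ≥ size ∧ cA + 1 ≥ L0) := by
                intro h; exact hq1 (by constructor <;> simp <;> omega)
              have hcond : ¬ (cA + 1 ≥ cM ∧ cA + 1 ≥ size) := by omega
              rw [if_neg hcond, hbnew, stepS_some, if_neg hq1]
              simp only []
              refine ⟨by omega, by simp; omega, ?_, ?_, ?_, ?_, ?_⟩
              · intro s' hs'; injection hs' with hs'; subst hs'; omega
              · intro h; simp at h
              · simp [encodeB, Prod.ext_iff]; omega
              · intro r hr; injection hr with hr; subst hr; omega
              · intro hbest
                injection hbest with hbest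
                rw [Prod.mk.injEq] at hbest
                -- the kept best is (0, 1): then size ≤ 1 ≤ cA + 1, contradiction with hq1'
                omega
    · -- the new cell is occupied: runs and best are unchanged
      have hclose : closeRuns (stepG (rs, os, i) x) = closeRuns (rs, os, i) := by
        cases os with
        | none => rw [stepG_occ_none rs i x hx]; simp [closeRuns]
        | some s => rw [stepG_occ_some rs s i x hx]; simp [closeRuns]
      have hosnew : (stepG (rs, os, i) x).2.1 = none := by
        cases os with
        | none => rw [stepG_occ_none rs i x hx]
        | some s => rw [stepG_occ_some rs s i x hx]
      have hinew : (stepG (rs, os, i) x).2.2 = i + 1 := by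
        cases os with
        | none => rw [stepG_occ_none rs i x hx]
        | some s => rw [stepG_occ_some rs s i x hx]
      rw [stepA_occ size aA aM cA cM x hx]
      refine ⟨?_, ?_, ?_, ?_, ?_, ?_, ?_⟩
      · rw [hinew]; simp only []; omega
      · rw [hinew]; simp; omega
      · intro s hs; rw [hosnew] at hs; simp at hs
      · intro _; rfl
      · rw [hclose]; exact h5
      · rw [hclose]; exact h6
      · rw [hclose]
        intro hbest
        obtain ⟨hne, hhead, htail⟩ := h7 hbest
        rcases p with _ | ⟨hd, tl⟩
        · exact absurd rfl hne
        · refine ⟨by simp, by simpa using hhead, ?_⟩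
          intro kv hkv
          simp at hkv
          rcases hkv with hkv | hkv
          · exact htail kv (by simpa using hkv)
          · rw [hkv]; exact hx

theorem foldA_nonfree (size : Int) (l : List (Int × Option Int)) :
    ∀ st : Int × Int × Int × Int, (∀ kv ∈ l, kv.2 ≠ none) →
      (l.foldl (stepA size) st).2.1 = st.2.1 ∧ (l.foldl (stepA size) st).2.2.2 = st.2.2.2 := by
  induction l with
  | nil => intro st _; exact ⟨rfl, rfl⟩
  | cons hd tl ih =>
    intro st h
    have hhd : hd.2 ≠ none := h hd (by simp)
    simp only [List.foldl_cons]
    rcases st with ⟨aA, aM, cA, cM⟩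
    rw [stepA_occ size aA aM cA cM hd hhd]
    exact ih (aA + 1, aM, 0, cM) (fun kv hkv => h kv (by simp [hkv]))

theorem foldG_nonfree (l : List (Int × Option Int)) :
    ∀ st : List (Int × Int) × Option Int × Int, (∀ kv ∈ l, kv.2 ≠ none) →
      closeRuns (l.foldl stepG st) = closeRuns st := by
  induction l with
  | nil => intro st _; rfl
  | cons hd tl ih =>
    intro st h
    have hhd : hd.2 ≠ none := h hd (by simp)
    simp only [List.foldl_cons]
    rw [ih (stepG st hd) (fun kv hkv => h kv (by simp [hkv]))]
    rcases st with ⟨rs, os, i⟩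
    cases os with
    | none => rw [stepG_occ_none rs i hd hhd]; simp [closeRuns]
    | some s => rw [stepG_occ_some rs s i hd hhd]; simp [closeRuns]

-- ===== VERDICT (by name: the statement is the Claim_ definition above) =====
theorem getBadWayWithSize_spec : Claim_unchanged_getBadWayWithSize := by
  intro cells size _ hD
  unfold getBadWayWithSize getBadWayWithSize_alt
  have hinv := inv_holds size cells
  rw [InvAB] at hinv
  rcases hA : cells.foldl (stepA size) (0, 0, 0, 0) with ⟨aA, aM, cA, cM⟩
  rcases hG : cells.foldl stepG ([], none, 0) with ⟨rs, os, i⟩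
  rw [hA, hG] at hinv
  obtain ⟨h1, h2, h3, h4, h5, h6, h7⟩ := hinv
  simp only at h5 h6 h7 ⊢
  rcases hb : bestOf size (closeRuns (rs, os, i)) with _ | ⟨s, L⟩
  all_goals rw [hb] at h5
  · simp only [encodeB, Prod.mk.injEq] at h5
    rw [if_neg (by simp [h5.1])]
    rw [show (closeRuns (rs, os, i)).foldl (stepS size) none = bestOf size (closeRuns (rs, os, i)) from rfl, hb]
  · simp only [encodeB, Prod.mk.injEq] at h5
    obtain ⟨hgs, hgL, hgsz⟩ := h6 (s, L) hb
    simp only at hgs hgL hgsz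
    by_cases hz : s + L - 1 = 0
    · exfalso
      have hsl : s = 0 ∧ L = 1 := by omega
      have hbest01 : bestOf size (closeRuns (rs, os, i)) = some (0, 1) := by
        rw [hb, hsl.1, hsl.2]
      obtain ⟨hne, hhead, htail⟩ := h7 hbest01
      exact hD ⟨hne, hhead, htail, by omega⟩
    · rw [if_pos (by omega)]
      rw [show (closeRuns (rs, os, i)).foldl (stepS size) none = bestOf size (closeRuns (rs, os, i)) from rfl, hb]
      simp only [Option.some.injEq]
      omega

theorem getBadWayWithSize_changed : Claim_changed_getBadWayWithSize := by
  unfold Claim_changed_getBadWayWithSize; decide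

theorem getBadWayWithSize_tight : Claim_exact_getBadWayWithSize := by
  intro cells size _ hD
  obtain ⟨hne, hhead, htail, hsz⟩ := hD
  rcases cells with _ | ⟨hd, tl⟩
  · exact absurd rfl hne
  have hhd : hd.2 = none := by simpa using hhead
  have htl : ∀ kv ∈ tl, kv.2 ≠ none := by intro kv hkv; exact htail kv (by simpa using hkv)
  unfold getBadWayWithSize getBadWayWithSize_alt
  simp only [List.foldl_cons]
  have hstep : stepA size (0, 0, 0, 0) hd = (1, 0, 1, 1) := by
    rw [stepA_free size 0 0 0 0 hd hhd, if_pos (by constructor <;> omega)]; norm_num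
  have hstepG : stepG ([], none, 0) hd = ([], some 0, 1) := by
    rw [stepG_free_none ([] : List (Int × Int)) 0 hd hhd]; norm_num
  rw [hstep, hstepG]
  obtain ⟨ha1, _⟩ := foldA_nonfree size tl (1, 0, 1, 1) htl
  rw [foldG_nonfree tl ([], some 0, 1) htl]
  simp only [ha1]
  have hcl : closeRuns (([] : List (Int × Int)), some 0, 1) = [(0, 1)] := by
    simp [closeRuns]
  rw [hcl]
  simp [stepS, hsz]
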